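-- pv_equiv track=rewrite | github.com/aarifsk/coding_questions | Leetcode/Python/1961_Check_If_String_Is_A_Prefix_Of_Array.py | isPrefixString
-- ===== SOURCE A (Python) =====
-- from typing import List
--
-- def isPrefixString(s: str, words: List[str]) -> bool:
--     length = len(words)
--     current = ""
--     for i in range(length):
--         current += words[i]
--         if not s.startswith(current):
--             return False
--         if s == current:
--             return True
--     return False
-- ===== SOURCE B (Python) =====
-- def isPrefixString(s: str, words: list) -> bool:
--     # single pass with a pointer: match each word at its offset in s
--     n = len(s)
--     pos = 0
--     for w in words:
--         if s[pos:pos + len(w)] != w: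
--             return False
--         pos += len(w)
--         if pos == n:
--             return True
--     return False
-- ===== Notes on version B (the rewrite author's own statement) =====
-- stated objective: alternative
-- what changed: B keeps a single integer offset and compares each word against the slice of s at that offset, instead of rebuilding the growing concatenation and re-running startswith over it each iteration; it avoids the repeated string concatenation but was not measurably faster on the generated inputs.
import Mathlib
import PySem

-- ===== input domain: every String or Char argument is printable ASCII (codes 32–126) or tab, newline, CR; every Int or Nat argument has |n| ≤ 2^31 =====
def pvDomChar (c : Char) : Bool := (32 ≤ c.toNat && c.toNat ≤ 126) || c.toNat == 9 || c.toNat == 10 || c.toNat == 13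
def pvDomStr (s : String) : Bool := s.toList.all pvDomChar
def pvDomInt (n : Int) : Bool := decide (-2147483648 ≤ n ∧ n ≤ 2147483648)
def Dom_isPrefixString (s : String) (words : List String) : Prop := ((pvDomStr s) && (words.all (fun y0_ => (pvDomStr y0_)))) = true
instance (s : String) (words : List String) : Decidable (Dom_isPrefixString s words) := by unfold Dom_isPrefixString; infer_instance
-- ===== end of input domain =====

-- B replaces A's growing concatenation + repeated startswith by a single integer
-- offset matched word by word against a slice of s (objective: alternative).

-- ===== PORT A =====
-- A's loop: current += words[i]; if not s.startswith(current): return False; if s == current: return True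
def pvALoop (s : List Char) : List String → List Char → Bool
  | [], _ => false
  | w :: ws, current =>
    let current' := current ++ w.toList
    if ¬ PySem.Chars.startswith s current' then false
    else if s = current' then true
    else pvALoop s ws current'

def isPrefixString (s : String) (words : List String) : Bool :=
  pvALoop s.toList words []

-- ===== PORT B =====
-- B's loop: if s[pos:pos+len(w)] != w: return False; pos += len(w); if pos == n: return True
def pvBLoop (s : List Char) : List String → Int → Bool
  | [], _ => false
  | w :: ws, pos =>
    if PySem.List.slice s (some pos) (some (pos + (w.toList.length : Int))) ≠ w.toList then false
    else
      let pos' := pos + (w.toList.length : Int)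
      if pos' = (s.length : Int) then true
      else pvBLoop s ws pos'

def isPrefixString_alt (s : String) (words : List String) : Bool :=
  pvBLoop s.toList words 0

-- ===== PRECONDITION & SPEC =====
def Spec_isPrefixString (s : String) (words : List String) (out : Bool) : Prop := out = isPrefixString_alt s words
instance (s : String) (words : List String) (out : Bool) : Decidable (Spec_isPrefixString s words out) := by unfold Spec_isPrefixString; infer_instance

-- ===== CLAIM (what is proved, stated in full; the proofs are below) =====
def Claim_equal_isPrefixString : Prop := ∀ (s : String) (words : List String), Dom_isPrefixString s words → Spec_isPrefixString s words (isPrefixString s words)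

-- ===== LEMMAS AND PROOFS =====

-- Invariant: A's `current` is always the first `pos` characters of `s`.
lemma pvLoop_eq (s : List Char) (ws : List String) (pos : Nat) (hpos : pos ≤ s.length) :
    pvALoop s ws (s.take pos) = pvBLoop s ws (pos : Int) := by
  induction ws generalizing pos with
  | nil => rfl
  | cons w ws ih =>
    show (if ¬ PySem.Chars.startswith s (s.take pos ++ w.toList) then false
          else if s = s.take pos ++ w.toList then true
          else pvALoop s ws (s.take pos ++ w.toList)) =
         (if PySem.List.slice s (some (pos : Int)) (some ((pos : Int) + (w.toList.length : Int))) ≠ w.toList then false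
          else if (pos : Int) + (w.toList.length : Int) = (s.length : Int) then true
          else pvBLoop s ws ((pos : Int) + (w.toList.length : Int)))
    rw [PySem.List.slice_natCast_add]
    have hcurlen : (s.take pos ++ w.toList).length = pos + w.toList.length := by
      rw [List.length_append, List.length_take, Nat.min_eq_left hpos]
    have hpre : (s.take pos ++ w.toList <+: s) ↔ (s.drop pos).take w.toList.length = w.toList := by
      rw [List.prefix_iff_eq_take, hcurlen, List.take_add, List.append_right_inj, eq_comm]
    by_cases hmatch : (s.drop pos).take w.toList.length = w.toList
    · have hsw : PySem.Chars.startswith s (s.take pos ++ w.toList) = true :=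
        (PySem.Chars.startswith_iff _ _).mpr (hpre.mpr hmatch)
      have hprefix : s.take pos ++ w.toList <+: s := hpre.mpr hmatch
      have hlen : pos + w.toList.length ≤ s.length := hcurlen ▸ hprefix.length_le
      have htake : s.take (pos + w.toList.length) = s.take pos ++ w.toList := by
        rw [List.take_add, hmatch]
      have heq : (s = s.take pos ++ w.toList) ↔ (pos + w.toList.length = s.length) := by
        constructor
        · intro h
          rw [← hcurlen, ← h]
        · intro h
          exact (hprefix.eq_of_length (by rw [hcurlen, h])).symm
      rw [if_neg (not_not_intro hsw), if_neg (not_not_intro hmatch)]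
      by_cases hdone : pos + w.toList.length = s.length
      · rw [if_pos (heq.mpr hdone), if_pos (by exact_mod_cast hdone)]
      · rw [if_neg (fun h => hdone (heq.mp h)), if_neg (by exact_mod_cast hdone)]
        have hrec := ih (pos + w.toList.length) hlen
        rw [htake] at hrec
        rw [hrec]
        norm_cast
    · have hsw : ¬ PySem.Chars.startswith s (s.take pos ++ w.toList) = true :=
        fun h => hmatch (hpre.mp ((PySem.Chars.startswith_iff _ _).mp h))
      rw [if_pos hsw, if_pos hmatch]

-- ===== VERDICT (by name: the statement is the Claim_ definition above) =====
theorem isPrefixString_spec : Claim_equal_isPrefixString := by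
  intro s words _
  unfold Spec_isPrefixString isPrefixString isPrefixString_alt
  have := pvLoop_eq s.toList words 0 (Nat.zero_le _)
  simpa using this
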